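-- pv_equiv track=rewrite | github.com/blopezpi/codewars-solutions | 6kyus/python/consonant_value.py | solve
-- ===== SOURCE A (Python) =====
-- vowels = "aeiou"
--
-- values = "abcdefghijklmnopqrstuvwxyz"
--
-- def solve(s):
--     vocab = [ i for i in values ]
--     sum = 0
--     result = []
--     for letter in s:
--         if letter not in vowels:
--             sum += vocab.index(letter) + 1
--         else:
--             sum = 0
--         result.append(sum)
--     return max(result)
-- ===== SOURCE B (Python) =====
-- def solve(s):
--     masked = "".join(" " if c in "aeiou" else c for c in s)
--     runs = masked.split(" ")
--     return max(sum(ord(c) - 96 for c in run) for run in runs)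
-- ===== Notes on version B (the rewrite author's own statement) =====
-- stated objective: alternative
-- what changed: B replaces A's single pass that accumulates a resettable running sum into a list and takes its max by a staged pipeline: mask vowels to spaces, split the string into maximal consonant runs, sum each run with ord(c)-96, and take the max of the run totals.
import Mathlib
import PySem

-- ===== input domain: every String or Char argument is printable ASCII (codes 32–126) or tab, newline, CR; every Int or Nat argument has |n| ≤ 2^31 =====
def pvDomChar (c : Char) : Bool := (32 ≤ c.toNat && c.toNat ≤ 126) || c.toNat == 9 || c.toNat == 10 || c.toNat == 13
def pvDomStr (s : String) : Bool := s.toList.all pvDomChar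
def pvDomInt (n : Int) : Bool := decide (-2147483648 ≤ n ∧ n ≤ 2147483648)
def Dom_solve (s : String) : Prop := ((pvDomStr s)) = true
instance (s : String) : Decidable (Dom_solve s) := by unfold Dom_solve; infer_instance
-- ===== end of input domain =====

-- B replaces A's single pass with a resettable running sum by a staged pipeline (mask vowels to spaces, split into consonant runs, sum each run, take the max of the run totals); equal values on every input where A returns.


-- ===== PORT A =====
-- literal port of A: per-letter value via PySem.List.index? on the vocab (none = ValueError,
-- excluded by Pre_; the getD 0 is never read inside Pre_), list of all running sums, final max
-- (max([]) = ValueError, excluded by Pre_)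
def pvLoopA (st : Int × List Int) (letter : Char) : Int × List Int :=
  let sum : Int :=
    if !(letter ∈ "aeiou".toList) then
      st.1 + (((PySem.List.index? "abcdefghijklmnopqrstuvwxyz".toList letter).getD 0 : Nat) : Int) + 1
    else 0
  (sum, st.2 ++ [sum])

def solve (s : String) : Int :=
  let r := s.toList.foldl pvLoopA (0, [])
  (PySem.List.max? r.2 (fun y => y)).getD 0

-- ===== PORT B =====
-- port of Source B: masked = "".join(' ' if c in "aeiou" else c for c in s); runs = masked.split(" ")
-- (sep ≠ "" → PySem.Chars.splitOn); max over the per-run sums of ord(c)-96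
-- (the runs list is never empty, so the getD 0 of the max is never read)
def pvRunSum (r : List Char) : Int :=
  r.foldl (fun a c => a + ((c.toNat : Int) - 96)) 0

def solve_alt (s : String) : Int :=
  let masked : List Char := s.toList.map (fun c => if c ∈ "aeiou".toList then ' ' else c)
  let runs : List (List Char) := PySem.Chars.splitOn masked [' ']
  (PySem.List.max? (runs.map pvRunSum) (fun y => y)).getD 0

-- ===== PRECONDITION & SPEC =====
-- Pre_ excludes exactly the inputs where A raises: the empty string (max of an empty list raises
-- ValueError) and strings containing any character that is not a lowercase letter a-z, on which
-- vocab.index raises ValueError.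
def Pre_solve (s : String) : Prop :=
  s.toList ≠ [] ∧ (s.toList.all (fun c => 97 ≤ c.toNat && c.toNat ≤ 122)) = true
instance (s : String) : Decidable (Pre_solve s) := by unfold Pre_solve; infer_instance
def pvWitness_solve : String := "zebra"

def Spec_solve (s : String) (out : Int) : Prop := out = solve_alt s
instance (s : String) (out : Int) : Decidable (Spec_solve s out) := by unfold Spec_solve; infer_instance

-- ===== CLAIM (what is proved, stated in full; the proofs are below) =====
def Claim_equal_solve : Prop := ∀ (s : String), Dom_solve s → Pre_solve s → Spec_solve s (solve s)

-- ===== LEMMAS AND PROOFS =====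

-- A's running sums, reset at vowels, with the ord-based letter value
def pvStep (sum : Int) (c : Char) : Int :=
  if c ∈ "aeiou".toList then 0 else sum + ((c.toNat : Int) - 96)

def pvRuns (sum : Int) : List Char → List Int
  | [] => []
  | c :: cs => pvStep sum c :: pvRuns (pvStep sum c) cs

-- Python split(sep) for a one-character separator, as a structural recursion
def mySplit (s0 : Char) : List Char → List (List Char)
  | [] => [[]]
  | c :: cs => if c = s0 then [] :: mySplit s0 cs else (mySplit s0 cs).modifyHead (c :: ·)

-- the maximal consonant runs of a lowercase string (what B's mask+split computes)
def runsL : List Char → List (List Char)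
  | [] => [[]]
  | c :: cs => if c ∈ "aeiou".toList then [] :: runsL cs else (runsL cs).modifyHead (c :: ·)

def headAdd (r : Int) : List Int → List Int
  | [] => []
  | x :: xs => (r + x) :: xs

theorem pv_index_fin : ∀ n : Fin 26,
    PySem.List.index? "abcdefghijklmnopqrstuvwxyz".toList (Char.ofNat (97 + n.val)) = some n.val := by
  decide

theorem pv_index_val (c : Char) (h1 : 97 ≤ c.toNat) (h2 : c.toNat ≤ 122) :
    (((PySem.List.index? "abcdefghijklmnopqrstuvwxyz".toList c).getD 0 : Nat) : Int) + 1
      = (c.toNat : Int) - 96 := by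
  have hk : c.toNat - 97 < 26 := by omega
  have h97 : 97 + (c.toNat - 97) = c.toNat := by omega
  have := pv_index_fin ⟨c.toNat - 97, hk⟩
  simp only [h97, Char.ofNat_toNat] at this
  rw [this]
  simp only [Option.getD_some]
  omega

theorem pv_loopA_eq (st : Int × List Int) (c : Char)
    (h1 : 97 ≤ c.toNat) (h2 : c.toNat ≤ 122) :
    pvLoopA st c = (pvStep st.1 c, st.2 ++ [pvStep st.1 c]) := by
  unfold pvLoopA pvStep
  by_cases hv : c ∈ "aeiou".toList
  · have hb : (!decide (c ∈ "aeiou".toList)) = false := by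
      rw [decide_eq_true hv]; rfl
    rw [hb, if_pos hv]
    simp
  · simp only [hv, decide_false, Bool.not_false, if_true, if_false]
    rw [add_assoc, pv_index_val c h1 h2]

theorem pv_foldA (L : List Char) : ∀ (sum : Int) (acc : List Int),
    (∀ c ∈ L, 97 ≤ c.toNat ∧ c.toNat ≤ 122) →
    (L.foldl pvLoopA (sum, acc)).2 = acc ++ pvRuns sum L := by
  induction L with
  | nil => intro sum acc _; simp [pvRuns]
  | cons c cs ih =>
    intro sum acc h
    have hc := h c (by simp)
    simp only [List.foldl_cons]
    rw [show pvLoopA (sum, acc) c = (pvStep sum c, acc ++ [pvStep sum c]) from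
      pv_loopA_eq (sum, acc) c hc.1 hc.2]
    rw [ih (pvStep sum c) (acc ++ [pvStep sum c]) (fun x hx => h x (by simp [hx]))]
    simp [pvRuns]

theorem pv_runs_nonneg (L : List Char) : ∀ (sum : Int), 0 ≤ sum →
    (∀ c ∈ L, 97 ≤ c.toNat ∧ c.toNat ≤ 122) → ∀ x ∈ pvRuns sum L, 0 ≤ x := by
  induction L with
  | nil => intro sum _ _ x hx; simp [pvRuns] at hx
  | cons c cs ih =>
    intro sum hsum h x hx
    have hc := h c (by simp)
    have hstep : 0 ≤ pvStep sum c := by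
      unfold pvStep; split
      · omega
      · have : (97 : Int) ≤ (c.toNat : Int) := by exact_mod_cast hc.1
        omega
    simp only [pvRuns, List.mem_cons] at hx
    rcases hx with rfl | hx
    · exact hstep
    · exact ih (pvStep sum c) hstep (fun y hy => h y (by simp [hy])) x hx

-- ---- B side: split(" ") of the masked list is runsL ----

theorem mySplit_ne_nil (s0 : Char) (l : List Char) : mySplit s0 l ≠ [] := by
  induction l with
  | nil => simp [mySplit]
  | cons c cs ih =>
    simp only [mySplit]
    split
    · simp
    · cases h : mySplit s0 cs with
      | nil => exact absurd h ih
      | cons a t => simp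

theorem pvGo_spec (s0 : Char) : ∀ (fuel : Nat) (l cur : List Char) (acc : List (List Char)),
    l.length < fuel →
    PySem.Chars.splitOn.go [s0] fuel l cur acc
      = acc.reverse ++ (mySplit s0 l).modifyHead (cur.reverse ++ ·) := by
  intro fuel
  induction fuel with
  | zero => intro l cur acc h; omega
  | succ n ih =>
    intro l cur acc h
    cases l with
    | nil => simp [PySem.Chars.splitOn.go, mySplit]
    | cons c rest =>
      rw [PySem.Chars.splitOn.go]
      by_cases hc : c = s0
      · subst hc
        simp only [List.isPrefixOf, BEq.rfl, Bool.and_self, if_true,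
          List.length_singleton, List.drop_one, List.tail_cons]
        rw [ih rest [] (cur.reverse :: acc) (by simpa using Nat.lt_of_succ_lt_succ h)]
        simp [mySplit]
        cases mySplit c rest <;> simp
      · have hb : ([s0].isPrefixOf (c :: rest)) = false := by
          simp [List.isPrefixOf, (Ne.symm hc)]
        rw [hb]
        simp only [Bool.false_eq_true, if_false]
        rw [ih rest (c :: cur) acc (by simpa using Nat.lt_of_succ_lt_succ h)]
        simp only [mySplit, if_neg hc, List.reverse_cons]
        obtain ⟨a, t, hat⟩ : ∃ a t, mySplit s0 rest = a :: t := by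
          cases hms : mySplit s0 rest with
          | nil => exact absurd hms (mySplit_ne_nil s0 rest)
          | cons a t => exact ⟨a, t, rfl⟩
        rw [hat]
        simp

theorem pv_splitOn_single (s0 : Char) (l : List Char) :
    PySem.Chars.splitOn l [s0] = mySplit s0 l := by
  unfold PySem.Chars.splitOn
  rw [pvGo_spec s0 (l.length + 1) l [] [] (by omega)]
  obtain ⟨a, t, hat⟩ : ∃ a t, mySplit s0 l = a :: t := by
    cases hms : mySplit s0 l with
    | nil => exact absurd hms (mySplit_ne_nil s0 l)
    | cons a t => exact ⟨a, t, rfl⟩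
  rw [hat]
  simp

theorem pv_mask_split (L : List Char)
    (h : ∀ c ∈ L, 97 ≤ c.toNat ∧ c.toNat ≤ 122) :
    mySplit ' ' (L.map (fun c => if c ∈ "aeiou".toList then ' ' else c)) = runsL L := by
  induction L with
  | nil => simp [mySplit, runsL]
  | cons c cs ih =>
    have hc := h c (by simp)
    have ih' := ih (fun x hx => h x (by simp [hx]))
    simp only [List.map_cons]
    by_cases hv : c ∈ "aeiou".toList
    · simp only [if_pos hv]
      simp only [mySplit, runsL]
      simp only [if_true]
      rw [if_pos hv, ih']
    · have hne : c ≠ ' ' := by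
        intro hcc
        subst hcc
        exact absurd hc.1 (by decide)
      simp only [if_neg hv]
      simp only [mySplit, runsL]
      rw [if_neg hne, if_neg hv, ih']

theorem runsL_ne_nil (l : List Char) : runsL l ≠ [] := by
  induction l with
  | nil => simp [runsL]
  | cons c cs ih =>
    simp only [runsL]
    split
    · simp
    · cases h : runsL cs with
      | nil => exact absurd h ih
      | cons a t => simp

theorem runsL_chars (L : List Char)
    (h : ∀ c ∈ L, 97 ≤ c.toNat ∧ c.toNat ≤ 122) :
    ∀ rn ∈ runsL L, ∀ c ∈ rn, 97 ≤ c.toNat ∧ c.toNat ≤ 122 := by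
  induction L with
  | nil => intro rn hrn c hc; simp [runsL] at hrn; simp [hrn] at hc
  | cons a cs ih =>
    intro rn hrn c hc
    have ih' := ih (fun x hx => h x (by simp [hx]))
    simp only [runsL] at hrn
    split at hrn
    · rcases List.mem_cons.mp hrn with rfl | hrn
      · simp at hc
      · exact ih' rn hrn c hc
    · obtain ⟨hh, t, hht⟩ : ∃ hh t, runsL cs = hh :: t := by
        cases hr : runsL cs with
        | nil => exact absurd hr (runsL_ne_nil cs)
        | cons x y => exact ⟨x, y, rfl⟩
      rw [hht] at hrn
      simp only [List.modifyHead_cons, List.mem_cons] at hrn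
      rcases hrn with rfl | hrn
      · rcases List.mem_cons.mp hc with rfl | hc
        · exact h c (by simp)
        · exact ih' hh (by rw [hht]; simp) c hc
      · exact ih' rn (by rw [hht]; simp [hrn]) c hc

theorem pvRunSum_shift (r : List Char) : ∀ a : Int,
    r.foldl (fun a c => a + ((c.toNat : Int) - 96)) a = a + pvRunSum r := by
  induction r with
  | nil => intro a; simp [pvRunSum]
  | cons c cs ih =>
    intro a
    simp only [List.foldl_cons, pvRunSum]
    rw [ih, ih]
    ring

theorem pvRunSum_cons (c : Char) (r : List Char) :
    pvRunSum (c :: r) = ((c.toNat : Int) - 96) + pvRunSum r := by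
  show r.foldl (fun a c => a + ((c.toNat : Int) - 96)) (0 + ((c.toNat : Int) - 96)) = _
  rw [pvRunSum_shift]
  ring

theorem pvRunSum_nonneg (r : List Char)
    (h : ∀ c ∈ r, 97 ≤ c.toNat ∧ c.toNat ≤ 122) : 0 ≤ pvRunSum r := by
  induction r with
  | nil => simp [pvRunSum]
  | cons c cs ih =>
    have hc := h c (by simp)
    have h97 : (97 : Int) ≤ (c.toNat : Int) := by exact_mod_cast hc.1
    rw [pvRunSum_cons]
    have := ih (fun x hx => h x (by simp [hx]))
    omega

theorem pvRunSum_nil : pvRunSum [] = 0 := rfl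

-- the key bridge: A's max over running sums = B's max over run totals
theorem pv_key (L : List Char) : ∀ (r b : Int), 0 ≤ r → r ≤ b →
    (∀ c ∈ L, 97 ≤ c.toNat ∧ c.toNat ≤ 122) →
    (pvRuns r L).foldl max b = (headAdd r ((runsL L).map pvRunSum)).foldl max b := by
  induction L with
  | nil =>
    intro r b hr hrb _
    simp only [pvRuns, runsL, List.map_cons, List.map_nil, headAdd, pvRunSum_nil,
      add_zero, List.foldl_nil, List.foldl_cons]
    exact (max_eq_left hrb).symm
  | cons c cs ih =>
    intro r b hr hrb h
    have hc := h c (by simp)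
    have h' : ∀ x ∈ cs, 97 ≤ x.toNat ∧ x.toNat ≤ 122 := fun x hx => h x (by simp [hx])
    obtain ⟨hh, t, hht⟩ : ∃ hh t, runsL cs = hh :: t := by
      cases hrr : runsL cs with
      | nil => exact absurd hrr (runsL_ne_nil cs)
      | cons x y => exact ⟨x, y, rfl⟩
    have hhchars : ∀ x ∈ hh, 97 ≤ x.toNat ∧ x.toNat ≤ 122 :=
      fun x hx => runsL_chars cs h' hh (by rw [hht]; simp) x hx
    have hhnn : 0 ≤ pvRunSum hh := pvRunSum_nonneg hh hhchars
    by_cases hv : c ∈ "aeiou".toList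
    · -- vowel: A resets to 0, B closes the current run
      simp only [pvRuns, pvStep, if_pos hv, runsL, List.map_cons, List.foldl_cons,
        headAdd, pvRunSum_nil, add_zero]
      rw [max_eq_left (by omega), max_eq_left hrb]
      rw [ih 0 b le_rfl (by omega) h', hht]
      simp only [List.map_cons, headAdd, zero_add]
    · -- consonant: both extend the current run
      have h97 : (97 : Int) ≤ (c.toNat : Int) := by exact_mod_cast hc.1
      simp only [pvRuns, pvStep, if_neg hv, runsL, List.foldl_cons]
      rw [ih (r + ((c.toNat : Int) - 96)) (max b (r + ((c.toNat : Int) - 96)))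
        (by omega) (le_max_right _ _) h']
      rw [hht]
      simp only [List.modifyHead_cons, List.map_cons, headAdd, List.foldl_cons,
        pvRunSum_cons]
      congr 1
      simp only [max_def]
      split_ifs <;> omega

-- ===== VERDICT (by name: the statement is the Claim_ definition above) =====
theorem solve_spec : Claim_equal_solve := by
  intro s _ hpre
  obtain ⟨hne, hall⟩ := hpre
  have haz : ∀ c ∈ s.toList, 97 ≤ c.toNat ∧ c.toNat ≤ 122 := by
    intro c hc
    have := List.all_eq_true.mp hall c hc
    simpa using this
  unfold Spec_solve solve solve_alt
  dsimp only
  rw [pv_foldA s.toList 0 [] haz, pv_splitOn_single, pv_mask_split s.toList haz]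
  simp only [List.nil_append]
  obtain ⟨hh, t, hht⟩ : ∃ hh t, runsL s.toList = hh :: t := by
    cases hrr : runsL s.toList with
    | nil => exact absurd hrr (runsL_ne_nil s.toList)
    | cons x y => exact ⟨x, y, rfl⟩
  have hhnn : 0 ≤ pvRunSum hh :=
    pvRunSum_nonneg hh (fun x hx => runsL_chars s.toList haz hh (by rw [hht]; simp) x hx)
  cases hL : pvRuns 0 s.toList with
  | nil =>
    cases hs : s.toList with
    | nil => exact absurd hs hne
    | cons c cs => rw [hs] at hL; simp [pvRuns] at hL
  | cons x xs =>
    have hx0 : 0 ≤ x := by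
      have := pv_runs_nonneg s.toList 0 le_rfl haz
      rw [hL] at this; exact this x (by simp)
    rw [hht]
    simp only [List.map_cons]
    rw [PySem.List.max?_id_cons, PySem.List.max?_id_cons]
    simp only [Option.getD_some]
    have hkey := pv_key s.toList 0 0 le_rfl le_rfl haz
    rw [hL, hht] at hkey
    simp only [List.foldl_cons, List.map_cons, headAdd, zero_add] at hkey
    rw [max_eq_right hx0, max_eq_right hhnn] at hkey
    exact hkey
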